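-- pv_equiv track=rewrite | github.com/pypi-data/pypi-mirror-271 | packages/celestical/celestical-0.14.3-py3-none-any.whl/celestical/helper.py | guess_service_type_by_name
-- ===== SOURCE A (Python) =====
-- SERVICE_TYPES = {
--     "FRONTEND": ["web", "www", "frontend", "traefik", "haproxy", "apache", "nginx"],
--     "API": ["api", "backend", "service", "node"],
--     "DB": ["database", "redis", "mongo", "mariadb", "postgre"],
--     "BATCH": ["hidden", "compute"],
--     "OTHER": []
-- }
--
-- def guess_service_type_by_name(service_name: str, img_name:str=""):
--     """ Quick guess of service type
--     """
--
--     if len(service_name) == 0: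
--         return ""
--
--     service_name = service_name.lower()
--
--     for stype in SERVICE_TYPES:
--         for guesser in SERVICE_TYPES[stype]:
--             if guesser in service_name:
--                 return stype
--
--     if img_name != "":
--         img_name = img_name.lower()
--         for stype in SERVICE_TYPES:
--             for guesser in SERVICE_TYPES[stype]:
--                 if guesser in img_name:
--                     return stype
--
--     # if nothing found
--     return "OTHER"
-- ===== SOURCE B (Python) =====
-- SERVICE_TYPES = {
--     "FRONTEND": ["web", "www", "frontend", "traefik", "haproxy", "apache", "nginx"],
--     "API": ["api", "backend", "service", "node"],
--     "DB": ["database", "redis", "mongo", "mariadb", "postgre"],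
--     "BATCH": ["hidden", "compute"],
--     "OTHER": []
-- }
--
-- # Built once: keyword -> priority (dict/list order), priority -> service type,
-- # and the distinct keyword lengths.
-- _KW_PRIO = {}
-- _PRIO_STYPE = []
-- for _stype, _kws in SERVICE_TYPES.items():
--     for _kw in _kws:
--         _KW_PRIO[_kw] = len(_PRIO_STYPE)
--         _PRIO_STYPE.append(_stype)
-- _LENS = sorted({len(_kw) for _kw in _KW_PRIO})
--
--
-- def _best_type(name):
--     """Scan the NAME's substrings (one window per keyword length at each
--     position), hash-look each up, and keep the smallest priority hit."""
--     best = None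
--     for i in range(len(name)):
--         for length in _LENS:
--             p = _KW_PRIO.get(name[i:i + length])
--             if p is not None and (best is None or p < best):
--                 best = p
--     return None if best is None else _PRIO_STYPE[best]
--
--
-- def guess_service_type_by_name(service_name: str, img_name: str = ""):
--     """ Quick guess of service type """
--     if service_name == "":
--         return ""
--     stype = _best_type(service_name.lower())
--     if stype is not None:
--         return stype
--     if img_name != "":
--         stype = _best_type(img_name.lower())
--         if stype is not None:
--             return stype
--     return "OTHER"
-- ===== Notes on version B (the rewrite author's own statement) =====
-- stated objective: alternative
-- what changed: Instead of scanning the keyword table and substring-testing each keyword against the name, B builds once a keyword->priority hash map plus the set of keyword lengths, slides a window over the NAME looking each window up in the map, and returns the service type of the smallest priority hit.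
import Mathlib
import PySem

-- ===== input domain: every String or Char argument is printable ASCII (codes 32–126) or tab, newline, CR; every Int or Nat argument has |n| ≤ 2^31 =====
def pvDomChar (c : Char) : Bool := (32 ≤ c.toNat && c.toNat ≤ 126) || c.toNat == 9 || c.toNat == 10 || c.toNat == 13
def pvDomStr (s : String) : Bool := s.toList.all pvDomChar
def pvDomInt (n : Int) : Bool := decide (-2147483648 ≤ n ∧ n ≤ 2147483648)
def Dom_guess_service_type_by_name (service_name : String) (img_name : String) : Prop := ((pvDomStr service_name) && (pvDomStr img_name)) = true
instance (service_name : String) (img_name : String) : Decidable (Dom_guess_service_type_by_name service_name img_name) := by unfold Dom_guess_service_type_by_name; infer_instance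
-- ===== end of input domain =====

-- B replaces A's nested scans over the keyword table (substring test per keyword) by the
-- reverse traversal: it slides a window over the NAME, hash-looks each window up in a
-- keyword→priority dict built once, and keeps the smallest priority hit (objective: alternative).

-- ===== PORT A =====
def pvServiceTypes : List (String × List String) :=
  [("FRONTEND", ["web", "www", "frontend", "traefik", "haproxy", "apache", "nginx"]),
   ("API", ["api", "backend", "service", "node"]),
   ("DB", ["database", "redis", "mongo", "mariadb", "postgre"]),
   ("BATCH", ["hidden", "compute"]),
   ("OTHER", [])]

-- inner loop: 'for guesser in SERVICE_TYPES[stype]: if guesser in name: return stype'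
def pvInnerScan (stype : String) (kws : List String) (name : String) : Option String :=
  match kws with
  | [] => none
  | g :: rest => if PySem.Str.isIn g name then some stype else pvInnerScan stype rest name

-- outer loop: 'for stype in SERVICE_TYPES: …'
def pvOuterScan (types : List (String × List String)) (name : String) : Option String :=
  match types with
  | [] => none
  | (st, kws) :: rest =>
    match pvInnerScan st kws name with
    | some r => some r
    | none => pvOuterScan rest name

def guess_service_type_by_name (service_name : String) (img_name : String) : String :=
  if PySem.Str.len service_name == 0 then ""
  else
    let sname := PySem.Str.lower service_name
    match pvOuterScan pvServiceTypes sname with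
    | some st => st
    | none =>
      if img_name != "" then
        let iname := PySem.Str.lower img_name
        match pvOuterScan pvServiceTypes iname with
        | some st => st
        | none => "OTHER"
      else "OTHER"

-- ===== PORT B =====
-- module-level build loop of Source B: _KW_PRIO (keyword → priority) and _PRIO_STYPE (priority → type)
def pvTables : PySem.Dict (List Char) Nat × List String :=
  pvServiceTypes.foldl
    (fun acc p => p.2.foldl (fun a kw => (a.1.insert kw.toList a.2.length, a.2 ++ [p.1])) acc)
    (PySem.Dict.empty, [])

def pvKwPrio : PySem.Dict (List Char) Nat := pvTables.1
def pvPrioStype : List String := pvTables.2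

-- _LENS = sorted({len(kw) for kw in _KW_PRIO})
def pvLens : List Nat :=
  PySem.List.sorted (PySem.Set.ofList (pvKwPrio.keys.map List.length)) (fun x => x) false

-- body of the 'for i …' loop of _best_type: 'for length in _LENS: p = _KW_PRIO.get(name[i:i+length]); if p is not None and (best is None or p < best): best = p'
def pvBestAt (name : List Char) (best : Option Nat) (i : Int) : Option Nat :=
  pvLens.foldl
    (fun b (L : Nat) =>
      match pvKwPrio.get? (PySem.List.slice name (some i) (some (i + (L : Int)))) with
      | none => b
      | some p =>
        match b with
        | none => some p
        | some q => if p < q then some p else b)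
    best

-- _best_type(name)
def pvBestType (name : List Char) : Option String :=
  match (PySem.List.pyRange 0 (name.length : Int) 1).foldl (pvBestAt name) none with
  | none => none
  | some p => some (pvPrioStype.getD p "")

def guess_service_type_by_name_alt (service_name : String) (img_name : String) : String :=
  if service_name = "" then ""
  else
    match pvBestType (PySem.Chars.lower service_name.toList) with
    | some st => st
    | none =>
      if img_name ≠ "" then
        match pvBestType (PySem.Chars.lower img_name.toList) with
        | some st => st
        | none => "OTHER"
      else "OTHER"

-- ===== PRECONDITION & SPEC =====
def Spec_guess_service_type_by_name (service_name : String) (img_name : String) (out : String) : Prop := out = guess_service_type_by_name_alt service_name img_name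
instance (service_name : String) (img_name : String) (out : String) : Decidable (Spec_guess_service_type_by_name service_name img_name out) := by unfold Spec_guess_service_type_by_name; infer_instance

-- ===== CLAIM (what is proved, stated in full; the proofs are below) =====
def Claim_equal_guess_service_type_by_name : Prop := ∀ (service_name : String) (img_name : String), Dom_guess_service_type_by_name service_name img_name → Spec_guess_service_type_by_name service_name img_name (guess_service_type_by_name service_name img_name)

-- ===== LEMMAS AND PROOFS =====

-- The 18 keywords in priority order, and the helper predicates of the proof.
def pvKwList : List (List Char) :=
  ["web".toList, "www".toList, "frontend".toList, "traefik".toList, "haproxy".toList,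
   "apache".toList, "nginx".toList, "api".toList, "backend".toList, "service".toList,
   "node".toList, "database".toList, "redis".toList, "mongo".toList, "mariadb".toList,
   "postgre".toList, "hidden".toList, "compute".toList]

def pvHit (cs : List Char) (k : Nat) : Bool := PySem.Chars.isIn (pvKwList.getD k []) cs

def pvToType (k : Nat) : String := pvPrioStype.getD k ""

-- first-match scan over flattened (keyword, stype) pairs — proof-side description of A
def pvLookup (pairs : List (String × String)) (name : String) : Option String :=
  match pairs with
  | [] => none
  | (kw, st) :: rest => if PySem.Str.isIn kw name then some st else pvLookup rest name

-- option-min combiner — proof-side description of B's accumulator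
def pvOmin (a b : Option Nat) : Option Nat :=
  match a, b with
  | none, b => b
  | some p, none => some p
  | some p, some q => some (min p q)

def pvAllLookups (cs : List Char) : List (Option Nat) :=
  (PySem.List.pyRange 0 (cs.length : Int) 1).flatMap
    (fun i => pvLens.map (fun (L : Nat) => pvKwPrio.get? (PySem.List.slice cs (some i) (some (i + (L : Int))))))

theorem pvKw_facts : ∀ k, k < 18 →
    pvKwList.getD k [] ≠ [] ∧ (pvKwList.getD k []).length ∈ pvLens ∧
      pvKwPrio.get? (pvKwList.getD k []) = some k := by
  intro k hk
  interval_cases k <;> decide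

theorem pvGet?_zipIdx (kws : List (List Char)) (n : Nat) (key : List Char) :
    (PySem.Dict.mk (kws.zipIdx n)).get? key = (kws.idxOf? key).map (· + n) := by
  induction kws generalizing n with
  | nil => simp [PySem.Dict.get?]
  | cons a t ih =>
    rw [List.zipIdx_cons, PySem.Dict.get?_mk_cons, List.idxOf?_cons]
    cases h : a == key with
    | true => simp [h]
    | false =>
      simp only [h, if_false, Bool.false_eq_true, ih, Option.map_map]
      congr 1
      funext x
      simp [Function.comp]
      omega

theorem pvKwPrio_eq : pvKwPrio = PySem.Dict.mk (pvKwList.zipIdx 0) := by decide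

theorem pvKwPrio_get?_eq (key : List Char) : pvKwPrio.get? key = pvKwList.idxOf? key := by
  rw [pvKwPrio_eq, pvGet?_zipIdx]
  cases pvKwList.idxOf? key <;> simp

-- A's nested scan over the grouped table equals the one-pass scan over the flattened pairs.
theorem pvInner_eq_lookup (st : String) (kws : List String) (name : String) :
    pvInnerScan st kws name = pvLookup (kws.map (fun kw => (kw, st))) name := by
  induction kws with
  | nil => rfl
  | cons g rest ih => simp [pvInnerScan, pvLookup, ih]

theorem pvOuter_eq_lookup (types : List (String × List String)) (name : String) :
    pvOuterScan types name =
      pvLookup (types.flatMap (fun p => p.2.map (fun kw => (kw, p.1)))) name := by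
  induction types with
  | nil => rfl
  | cons p rest ih =>
    obtain ⟨st, kws⟩ := p
    rw [List.flatMap_cons]
    rw [pvOuterScan, pvInner_eq_lookup]
    induction (kws.map (fun kw => (kw, st))) with
    | nil => simpa using ih
    | cons q qs ih2 =>
      obtain ⟨kw, st'⟩ := q
      cases h : PySem.Chars.isIn kw.toList name.toList <;> simp [pvLookup, h, ih2]

-- A's first-match scan, described as find? over the priority indices.
theorem pvLookup_eq_find?_gen (pairs : List (String × String)) (s : String) :
    pvLookup pairs s =
      ((List.range pairs.length).find? (fun k => PySem.Str.isIn (pairs.getD k ("", "")).1 s)).map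
        (fun k => (pairs.getD k ("", "")).2) := by
  induction pairs with
  | nil => rfl
  | cons q rest ih =>
    obtain ⟨kw, st⟩ := q
    rw [pvLookup]
    cases h : PySem.Chars.isIn kw.toList s.toList with
    | true =>
      simp [List.range_succ_eq_map, List.find?_cons, PySem.Str.isIn, h]
    | false =>
      simp [List.range_succ_eq_map, List.find?_cons, PySem.Str.isIn, h, ih,
        List.find?_map, Function.comp_def, List.getElem?_cons_succ, Option.map_map]
  
theorem pvLookup_eq_find? (s : String) :
    pvLookup (pvServiceTypes.flatMap (fun p => p.2.map (fun kw => (kw, p.1)))) s =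
      ((List.range 18).find? (pvHit s.toList)).map pvToType := by
  rw [pvLookup_eq_find?_gen]
  have hlen : (pvServiceTypes.flatMap (fun p => p.2.map (fun kw => (kw, p.1)))).length = 18 := by decide
  rw [hlen]
  have hp : (fun k => PySem.Str.isIn ((pvServiceTypes.flatMap (fun p => p.2.map (fun kw => (kw, p.1)))).getD k ("", "")).1 s)
      = pvHit s.toList := by
    funext k
    by_cases hk : k < 18
    · interval_cases k <;> rfl
    · rw [List.getD_eq_default _ _ (by rw [hlen]; omega), pvHit,
        List.getD_eq_default _ _ (by simp [pvKwList]; omega)]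
      simp [PySem.Str.isIn, PySem.Chars.isIn_nil]
  rw [hp]
  cases h : (List.range 18).find? (pvHit s.toList) with
  | none => rfl
  | some k =>
    have hk : k < 18 := by
      have := List.mem_of_find?_eq_some h
      simpa [List.mem_range] using this
    simp only [Option.map_some]
    congr 1
    interval_cases k <;> decide

theorem pvMin?_congr (l l' : List Nat) (h : ∀ x, x ∈ l ↔ x ∈ l') : l.min? = l'.min? := by
  have hs : ∀ a, l.min? = some a ↔ l'.min? = some a := by
    intro a
    rw [List.min?_eq_some_iff, List.min?_eq_some_iff]
    constructor
    · rintro ⟨h1, h2⟩; exact ⟨(h a).1 h1, fun b hb => h2 b ((h b).2 hb)⟩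
    · rintro ⟨h1, h2⟩; exact ⟨(h a).2 h1, fun b hb => h2 b ((h b).1 hb)⟩
  cases hm : l.min? with
  | some a => exact ((hs a).1 hm).symm
  | none =>
    cases hm' : l'.min? with
    | none => rfl
    | some a => rw [(hs a).2 hm'] at hm; cases hm

theorem pvFoldl_min_of_le (t : List Nat) (a : Nat) (h : ∀ x ∈ t, a ≤ x) : t.foldl min a = a := by
  induction t with
  | nil => rfl
  | cons x xs ih =>
    simp only [List.foldl_cons]
    rw [min_eq_left (h x (by simp))]
    exact ih (fun y hy => h y (by simp [hy]))

theorem pvMin?_eq_head?_of_sorted (l : List Nat) (h : l.Pairwise (· < ·)) : l.min? = l.head? := by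
  cases l with
  | nil => rfl
  | cons a t =>
    rw [List.min?_cons']
    have := (List.pairwise_cons.mp h).1
    simp [pvFoldl_min_of_le t a (fun x hx => le_of_lt (this x hx))]

theorem pvOmin_assoc (a b c : Option Nat) : pvOmin (pvOmin a b) c = pvOmin a (pvOmin b c) := by
  cases a <;> cases b <;> cases c <;> simp [pvOmin, Nat.min_assoc]

theorem pvFoldl_omin (xs : List (Option Nat)) (b : Option Nat) :
    xs.foldl pvOmin b = pvOmin b (xs.filterMap id).min? := by
  induction xs generalizing b with
  | nil => cases b <;> rfl
  | cons o t ih =>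
    simp only [List.foldl_cons, ih]
    cases o with
    | none => simp [pvOmin]; cases b <;> rfl
    | some p =>
      have hcons : (p :: t.filterMap id).min? = pvOmin (some p) (t.filterMap id).min? := by
        rw [List.min?_cons]
        cases (t.filterMap id).min? <;> rfl
      show pvOmin (pvOmin b (some p)) (t.filterMap id).min? = pvOmin b (p :: t.filterMap id).min?
      rw [hcons, pvOmin_assoc]

theorem pvStep_eq_omin (b o : Option Nat) :
    (match o with
     | none => b
     | some p =>
       match b with
       | none => some p
       | some q => if p < q then some p else b) = pvOmin b o := by
  cases o with
  | none => cases b <;> rfl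
  | some p =>
    cases b with
    | none => rfl
    | some q =>
      simp only [pvOmin]
      split_ifs with h <;> simp [Nat.min_eq_right, Nat.min_eq_left, le_of_lt, h] <;> omega

theorem pvBest_fold_eq (cs : List Char) :
    (PySem.List.pyRange 0 (cs.length : Int) 1).foldl (pvBestAt cs) none =
      ((pvAllLookups cs).filterMap id).min? := by
  have hfun : pvBestAt cs = fun (b : Option Nat) (i : Int) =>
      (pvLens.map (fun (L : Nat) => pvKwPrio.get? (PySem.List.slice cs (some i) (some (i + (L : Int)))))).foldl pvOmin b := by
    funext b i
    rw [List.foldl_map, pvBestAt]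
    have h : (fun (b : Option Nat) (L : Nat) =>
        match pvKwPrio.get? (PySem.List.slice cs (some i) (some (i + (L : Int)))) with
        | none => b
        | some p =>
          match b with
          | none => some p
          | some q => if p < q then some p else b) =
        fun (b : Option Nat) (L : Nat) =>
          pvOmin b (pvKwPrio.get? (PySem.List.slice cs (some i) (some (i + (L : Int))))) := by
      funext b L; exact pvStep_eq_omin b _
    rw [h]
  rw [hfun, ← List.foldl_flatMap, ← pvAllLookups, pvFoldl_omin]
  rfl

theorem pvKwList_length : pvKwList.length = 18 := by decide

theorem pvMem_allLookups (cs : List Char) (k : Nat) :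
    k ∈ (pvAllLookups cs).filterMap id ↔ k < 18 ∧ pvHit cs k = true := by
  rw [List.mem_filterMap]
  constructor
  · rintro ⟨o, ho, hid⟩
    simp only [id_eq] at hid
    subst hid
    rw [pvAllLookups] at ho
    simp only [List.mem_flatMap, List.mem_map] at ho
    obtain ⟨i, hi, L, hL, hget⟩ := ho
    rw [pvKwPrio_get?_eq, List.idxOf?_eq_some_iff] at hget
    obtain ⟨hk18, hkey, -⟩ := hget
    have hk : k < 18 := by rwa [pvKwList_length] at hk18
    refine ⟨hk, ?_⟩
    obtain ⟨hi0, hilt⟩ := (PySem.List.mem_pyRange_one).1 hi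
    rw [PySem.List.slice_toNat _ hi0 (by omega)] at hkey
    have hnat : (i + (L : Int)).toNat - i.toNat = L := by omega
    rw [hnat] at hkey
    rw [pvHit, ← PySem.Chars.exists_prefix_drop_iff_isIn]
    refine ⟨i.toNat, ?_⟩
    rw [List.getD_eq_getElem _ _ hk18, hkey]
    exact List.take_prefix _ _
  · rintro ⟨hk, hhit⟩
    obtain ⟨hne, hLmem, hget⟩ := pvKw_facts k hk
    rw [pvHit, ← PySem.Chars.exists_prefix_drop_iff_isIn] at hhit
    obtain ⟨j, hpre⟩ := hhit
    have hjlt : j < cs.length := by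
      by_contra hge
      rw [List.drop_eq_nil_of_le (by omega)] at hpre
      exact hne (List.prefix_nil.mp hpre)
    refine ⟨some k, ?_, rfl⟩
    rw [pvAllLookups]
    simp only [List.mem_flatMap, List.mem_map]
    refine ⟨(j : Int), ?_, (pvKwList.getD k []).length, hLmem, ?_⟩
    · rw [PySem.List.mem_pyRange_one]
      constructor <;> [positivity; exact_mod_cast hjlt]
    · rw [PySem.List.slice_natCast_add, ← List.prefix_iff_eq_take.mp hpre, hget]

theorem pvScan_eq_best (s : String) :
    pvOuterScan pvServiceTypes s = pvBestType s.toList := by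
  rw [pvOuter_eq_lookup, pvLookup_eq_find?]
  simp only [pvBestType, pvBest_fold_eq]
  have hmem : ∀ x, x ∈ (pvAllLookups s.toList).filterMap id ↔
      x ∈ (List.range 18).filter (pvHit s.toList) := by
    intro x
    rw [pvMem_allLookups, List.mem_filter, List.mem_range]
  rw [pvMin?_congr _ _ hmem,
    pvMin?_eq_head?_of_sorted _ ((List.pairwise_lt_range).filter _),
    ← List.head?_filter]
  cases h : (List.range 18).find? (pvHit s.toList) <;> simp [h, pvToType]

theorem pvLen_eq_zero (s : String) (h : s ≠ "") : (PySem.Str.len s == 0) = false := by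
  simp [PySem.Str.len]
  intro hnil
  exact h (String.ext (by simp [hnil]))

-- ===== VERDICT (by name: the statement is the Claim_ definition above) =====
theorem guess_service_type_by_name_spec : Claim_equal_guess_service_type_by_name := by
  intro service_name img_name _
  unfold Spec_guess_service_type_by_name guess_service_type_by_name guess_service_type_by_name_alt
  by_cases hs : service_name = ""
  · simp [hs, PySem.Str.len]
  · rw [pvLen_eq_zero _ hs]
    have h1 : pvOuterScan pvServiceTypes (PySem.Str.lower service_name) =
        pvBestType (PySem.Chars.lower service_name.toList) := by
      rw [pvScan_eq_best]; simp [PySem.Str.lower]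
    have h2 : pvOuterScan pvServiceTypes (PySem.Str.lower img_name) =
        pvBestType (PySem.Chars.lower img_name.toList) := by
      rw [pvScan_eq_best]; simp [PySem.Str.lower]
    simp [hs, h1, h2]
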